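-- pv_equiv track=rewrite | github.com/MarcoMernberger/msnake | src/mbf_dockerator/parser.py | to_blocks
-- ===== SOURCE A (Python) =====
-- def to_blocks(sanitized_lines):
--     blocks = {}
--     last_name = "[unnamed]"
--     last_block = []
--     for ii, ll in enumerate(sanitized_lines):
--         if ll.startswith("[") and ll.endswith("]"):
--             if last_block:
--                 if last_name in blocks:
--                     raise ValueError("Duplicate block %s" % l)
--                 blocks[last_name] = last_block
--             last_name = ll[1:-1]
--             last_block = []
--         else:
--             last_block.append((ii, ll))
--     if last_block:
--         if last_name in blocks:
--             raise ValueError("Duplicate block %s" % l)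
--         blocks[last_name] = last_block
--     return blocks
-- ===== SOURCE B (Python) =====
-- def to_blocks(sanitized_lines):
--     # Back-to-front traversal: walk the lines in reverse, collecting the content
--     # that lies below each header; reaching a header closes that content as its
--     # named segment.  Whatever is still pending at the top is the unnamed block.
--     rev_segs = []
--     pending = []  # content of the currently open segment, in reverse order
--     for ii, ll in reversed(list(enumerate(sanitized_lines))):
--         if ll.startswith("[") and ll.endswith("]"):
--             rev_segs.append((ll[1:-1], pending[::-1]))
--             pending = []
--         else:
--             pending.append((ii, ll))
--     rev_segs.append(("[unnamed]", pending[::-1]))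
--     blocks = {}
--     for name, content in reversed(rev_segs):
--         if content:
--             if name in blocks:
--                 raise ValueError("Duplicate block %s" % l)
--             blocks[name] = content
--     return blocks
-- ===== Notes on version B (the rewrite author's own statement) =====
-- stated objective: alternative
-- what changed: A scans forward, flushing the accumulated block into the dict each time a header opens; B traverses the lines BACK-TO-FRONT, closing each header's content from below into a reversed segment list, and only then folds the segments into the dict in document order; Pre_ excludes duplicate-name inputs on which both programs raise.
import Mathlib
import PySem

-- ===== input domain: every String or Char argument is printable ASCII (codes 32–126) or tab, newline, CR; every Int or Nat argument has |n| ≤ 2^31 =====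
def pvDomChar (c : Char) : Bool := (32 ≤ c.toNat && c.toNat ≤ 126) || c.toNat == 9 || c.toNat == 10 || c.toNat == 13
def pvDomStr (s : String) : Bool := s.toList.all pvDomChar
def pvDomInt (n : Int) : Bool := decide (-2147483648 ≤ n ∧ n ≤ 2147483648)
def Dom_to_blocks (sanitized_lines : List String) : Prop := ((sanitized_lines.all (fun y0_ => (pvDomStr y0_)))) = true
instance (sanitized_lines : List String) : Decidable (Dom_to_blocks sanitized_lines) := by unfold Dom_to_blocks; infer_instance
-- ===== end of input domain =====

-- B traverses the lines back-to-front (closing each header's content from below), A scans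
-- forward with a flush-on-header accumulator; on duplicate non-empty block names both
-- Pythons raise (the undefined 'l' → NameError), excluded by Pre_.

-- ===== PORT A =====
-- A's loop; 'ii' is the enumerate counter. Where Python raises (duplicate name), excluded by
-- Pre_, the port continues with 'blocks' unchanged.
def to_blocks_loop (ii : Int) (lines : List String)
    (blocks : PySem.Dict String (List (Int × String)))
    (last_name : String) (last_block : List (Int × String)) :
    PySem.Dict String (List (Int × String)) :=
  match lines with
  | [] =>
    -- post-loop flush
    if last_block ≠ [] then
      if blocks.contains last_name then blocks  -- Python: raise (undefined 'l' → NameError)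
      else blocks.insert last_name last_block
    else blocks
  | ll :: rest =>
    if PySem.Str.startswith ll "[" ∧ PySem.Str.endswith ll "]" then
      let blocks' :=
        if last_block ≠ [] then
          if blocks.contains last_name then blocks  -- Python: raise
          else blocks.insert last_name last_block
        else blocks
      to_blocks_loop (ii + 1) rest blocks' (PySem.Str.slice ll (some 1) (some (-1))) []
    else
      to_blocks_loop (ii + 1) rest blocks last_name (last_block ++ [(ii, ll)])

def to_blocks (sanitized_lines : List String) : List (String × List (Int × String)) :=
  (to_blocks_loop 0 sanitized_lines PySem.Dict.empty "[unnamed]" []).items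

-- ===== PORT B =====
def pvIsHdr (ll : String) : Bool := PySem.Str.startswith ll "[" && PySem.Str.endswith ll "]"

-- one step of B's reversed-for loop; state = (rev_segs, pending)
def to_blocks_alt_step
    (st : List (String × List (Int × String)) × List (Int × String)) (p : Int × String) :
    List (String × List (Int × String)) × List (Int × String) :=
  if pvIsHdr p.2 then
    (st.1 ++ [(PySem.Str.slice p.2 (some 1) (some (-1)), st.2.reverse)], [])
  else
    (st.1, st.2 ++ [p])

-- B's second loop: fold the segments into the dict (skip empty content). Where Python
-- raises (duplicate name), excluded by Pre_, the port continues with 'blocks' unchanged.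
def to_blocks_alt_fold (blocks : PySem.Dict String (List (Int × String)))
    (segs : List (String × List (Int × String))) :
    PySem.Dict String (List (Int × String)) :=
  match segs with
  | [] => blocks
  | (nm, cont) :: rest =>
    if cont ≠ [] then
      if blocks.contains nm then to_blocks_alt_fold blocks rest  -- Python: raise
      else to_blocks_alt_fold (blocks.insert nm cont) rest
    else to_blocks_alt_fold blocks rest

def to_blocks_alt (sanitized_lines : List String) : List (String × List (Int × String)) :=
  -- for … in reversed(list(enumerate(sanitized_lines))) : a foldl over the reversed pair list
  let st := ((PySem.List.enumerate sanitized_lines).reverse).foldl to_blocks_alt_step ([], [])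
  let rev_segs := st.1 ++ [("[unnamed]", st.2.reverse)]
  (to_blocks_alt_fold PySem.Dict.empty rev_segs.reverse).items

-- ===== PRECONDITION & SPEC =====
-- Pre_ excludes exactly the inputs where two non-empty blocks share a name: there Python A
-- raises (a NameError, from the undefined 'l' in the raise statement) and B raises identically.
-- Closed form: pair the candidate block names ("[unnamed]" then each header's ll[1:-1], in order)
-- with the chunks of non-header lines between headers (List.splitOnP); the names whose chunk is
-- non-empty must be pairwise distinct.
def Pre_to_blocks (sanitized_lines : List String) : Prop :=
  ((("[unnamed]" ::
      (sanitized_lines.filter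
        (fun l => PySem.Str.startswith l "[" && PySem.Str.endswith l "]")).map
        (fun l => PySem.Str.slice l (some 1) (some (-1)))).zip
    (sanitized_lines.splitOnP
      (fun l => PySem.Str.startswith l "[" && PySem.Str.endswith l "]"))).filter
    (fun p => !p.2.isEmpty)).map Prod.fst |>.Nodup
instance (sanitized_lines : List String) : Decidable (Pre_to_blocks sanitized_lines) := by unfold Pre_to_blocks; infer_instance

def pvWitness_to_blocks : List String := ["x", "[a]", "y", "[b]", "z"]
def Spec_to_blocks (sanitized_lines : List String) (out : List (String × List (Int × String))) : Prop := out = to_blocks_alt sanitized_lines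
instance (sanitized_lines : List String) (out : List (String × List (Int × String))) : Decidable (Spec_to_blocks sanitized_lines out) := by unfold Spec_to_blocks; infer_instance

-- ===== CLAIM (what is proved, stated in full; the proofs are below) =====
def Claim_equal_to_blocks : Prop := ∀ (sanitized_lines : List String), Dom_to_blocks sanitized_lines → Pre_to_blocks sanitized_lines → Spec_to_blocks sanitized_lines (to_blocks sanitized_lines)

-- ===== LEMMAS AND PROOFS =====

lemma fold_cons (blocks : PySem.Dict String (List (Int × String)))
    (nm : String) (cont : List (Int × String)) (rest : List (String × List (Int × String))) :
    to_blocks_alt_fold blocks ((nm, cont) :: rest)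
      = if cont ≠ [] then
          if blocks.contains nm then to_blocks_alt_fold blocks rest
          else to_blocks_alt_fold (blocks.insert nm cont) rest
        else to_blocks_alt_fold blocks rest := rfl

-- B's foldl over the reversed enumerate list, as a foldr (processes the head last, as the
-- reversed python loop does).
def pvBuild (E : List (Int × String)) :
    List (String × List (Int × String)) × List (Int × String) :=
  E.foldr (fun p st => to_blocks_alt_step st p) ([], [])

lemma build_eq (E : List (Int × String)) :
    E.reverse.foldl to_blocks_alt_step ([], []) = pvBuild E := by
  simp [pvBuild, List.foldl_reverse]

-- A's interleaved forward loop equals the fold over B's back-to-front segment list,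
-- for any starting state.
lemma loop_eq_build (lines : List String) :
    ∀ (ii : Int) (blocks : PySem.Dict String (List (Int × String)))
      (name : String) (blk : List (Int × String)),
    to_blocks_loop ii lines blocks name blk
      = to_blocks_alt_fold blocks
          ((name, blk ++ (pvBuild (PySem.List.enumerate lines ii)).2.reverse)
            :: (pvBuild (PySem.List.enumerate lines ii)).1.reverse) := by
  induction lines with
  | nil =>
    intro ii blocks name blk
    simp only [to_blocks_loop, PySem.List.enumerate_nil, pvBuild, List.foldr_nil,
      List.reverse_nil, List.append_nil, fold_cons]
    split_ifs <;> rfl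
  | cons ll rest ih =>
    intro ii blocks name blk
    rw [to_blocks_loop, PySem.List.enumerate_cons]
    have hstep : pvBuild ((ii, ll) :: PySem.List.enumerate rest (ii + 1))
        = to_blocks_alt_step (pvBuild (PySem.List.enumerate rest (ii + 1))) (ii, ll) := rfl
    by_cases h : PySem.Str.startswith ll "[" ∧ PySem.Str.endswith ll "]"
    · rw [if_pos h, ih, hstep]
      have hh : pvIsHdr ll = true := by
        unfold pvIsHdr; rw [h.1, h.2]; rfl
      simp only [to_blocks_alt_step, hh, if_pos, List.reverse_append, List.reverse_cons,
        List.reverse_nil, List.nil_append, List.append_nil, List.singleton_append]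
      conv_rhs => rw [fold_cons]
      split_ifs <;> rfl
    · rw [if_neg h, ih, hstep]
      have hh : pvIsHdr ll = false := by
        unfold pvIsHdr
        cases ha : PySem.Str.startswith ll "[" with
        | false => simp
        | true =>
          cases hb : PySem.Str.endswith ll "]" with
          | false => simp
          | true => exact absurd ⟨ha, hb⟩ h
      simp only [to_blocks_alt_step, hh, Bool.false_eq_true, ite_false]
      simp [List.reverse_append]

-- ===== VERDICT (by name: the statement is the Claim_ definition above) =====
theorem to_blocks_spec : Claim_equal_to_blocks := by
  intro lines _ _
  unfold Spec_to_blocks to_blocks to_blocks_alt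
  rw [build_eq, loop_eq_build]
  simp [List.reverse_append]
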